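-- pv_equiv track=rewrite | github.com/opsappcsteam/onboarding_repo | mds_functions.py | field_array_of_arrays
-- ===== SOURCE A (Python) =====
-- def field_array_of_arrays(ref_array, split_array):
--     field_array_of_arrays = []
--     array = []
--     i = 0
--     while i < len(split_array):
--         if i == 0:
--             array.append(split_array[i])
--         elif ref_array[i] == 'nan' and ref_array[i - 1] == 'nan' or ref_array[i] == 'nan' and ref_array[i - 1] != 'nan':
--             array.append(split_array[i])
--         else:
--             field_array_of_arrays.append(array)
--             array = []
--             array.append(split_array[i])
--         i += 1
--     field_array_of_arrays.append(array)
--     return field_array_of_arrays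
-- ===== SOURCE B (Python) =====
-- def field_array_of_arrays(ref_array, split_array):
--     # Phase 1: table of group-start boundaries.
--     starts = [0] + [i for i in range(1, len(split_array)) if ref_array[i] != 'nan']
--     # Phase 2: slice split_array between consecutive boundaries.
--     ends = starts[1:] + [len(split_array)]
--     return [split_array[s:e] for s, e in zip(starts, ends)]
-- ===== Notes on version B (the rewrite author's own statement) =====
-- stated objective: alternative
-- what changed: B replaces A's single stateful accumulate-and-flush loop by two phases: first compute the table of group-start boundary indices (0 plus each i with ref_array[i] != 'nan'), then build the result by slicing split_array between consecutive boundaries.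
import Mathlib
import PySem

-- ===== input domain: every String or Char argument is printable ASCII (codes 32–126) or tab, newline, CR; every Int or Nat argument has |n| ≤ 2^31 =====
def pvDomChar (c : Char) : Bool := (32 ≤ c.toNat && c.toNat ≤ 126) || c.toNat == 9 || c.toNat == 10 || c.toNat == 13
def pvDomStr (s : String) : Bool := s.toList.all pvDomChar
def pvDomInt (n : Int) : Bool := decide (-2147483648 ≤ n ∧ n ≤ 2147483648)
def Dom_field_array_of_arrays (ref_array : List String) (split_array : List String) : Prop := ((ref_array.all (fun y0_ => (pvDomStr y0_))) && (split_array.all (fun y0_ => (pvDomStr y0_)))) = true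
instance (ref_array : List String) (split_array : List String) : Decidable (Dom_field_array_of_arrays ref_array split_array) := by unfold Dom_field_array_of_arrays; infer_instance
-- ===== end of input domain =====

-- B groups split_array into 'nan'-delimited runs by a two-phase boundary-table-then-slice
-- decomposition instead of A's single accumulate-and-flush loop (objective: alternative).

-- ===== PORT A =====
-- one iteration of A's while-loop body, state = (field_array_of_arrays, array)
def pvStepA (ref_array : List String) (split_array : List String)
    (s : List (List String) × List String) (i : Int) : List (List String) × List String :=
  if i == 0 then
    (s.1, s.2 ++ [PySem.List.pyGetD split_array i ""])
  else if (PySem.List.pyGetD ref_array i "" == "nan" && PySem.List.pyGetD ref_array (i - 1) "" == "nan")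
       || (PySem.List.pyGetD ref_array i "" == "nan" && PySem.List.pyGetD ref_array (i - 1) "" != "nan") then
    (s.1, s.2 ++ [PySem.List.pyGetD split_array i ""])
  else
    (s.1 ++ [s.2], [PySem.List.pyGetD split_array i ""])

def field_array_of_arrays (ref_array : List String) (split_array : List String) : List (List String) :=
  let st := (PySem.List.pyRange 0 (split_array.length : Int) 1).foldl (pvStepA ref_array split_array) ([], [])
  st.1 ++ [st.2]

-- ===== PORT B =====
def field_array_of_arrays_alt (ref_array : List String) (split_array : List String) : List (List String) :=
  let n : Int := (split_array.length : Int)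
  let starts : List Int :=
    0 :: (PySem.List.pyRange 1 n 1).filter (fun i => PySem.List.pyGetD ref_array i "" != "nan")
  let ends : List Int := PySem.List.slice starts (some 1) none ++ [n]
  (starts.zip ends).map (fun se => PySem.List.slice split_array (some se.1) (some se.2))

-- ===== PRECONDITION & SPEC =====
-- Pre_ excludes exactly the inputs where the Python A raises IndexError
-- (ref_array shorter than split_array with at least two items to split); B raises there too.
def Pre_field_array_of_arrays (ref_array : List String) (split_array : List String) : Prop :=
  split_array.length ≤ 1 ∨ split_array.length ≤ ref_array.length
instance (ref_array : List String) (split_array : List String) : Decidable (Pre_field_array_of_arrays ref_array split_array) := by unfold Pre_field_array_of_arrays; infer_instance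
def pvWitness_field_array_of_arrays : List String × List String := (["nan", "x", "nan"], ["a", "b", "c"])

def Spec_field_array_of_arrays (ref_array : List String) (split_array : List String) (out : List (List String)) : Prop := out = field_array_of_arrays_alt ref_array split_array
instance (ref_array : List String) (split_array : List String) (out : List (List String)) : Decidable (Spec_field_array_of_arrays ref_array split_array out) := by unfold Spec_field_array_of_arrays; infer_instance

-- ===== CLAIM (what is proved, stated in full; the proofs are below) =====
def Claim_equal_field_array_of_arrays : Prop := ∀ (ref_array : List String) (split_array : List String), Dom_field_array_of_arrays ref_array split_array → Pre_field_array_of_arrays ref_array split_array → Spec_field_array_of_arrays ref_array split_array (field_array_of_arrays ref_array split_array)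

-- ===== LEMMAS AND PROOFS =====

-- abbreviations used only by the proofs
def pvSlice (split_array : List String) (a b : Int) : List String :=
  PySem.List.slice split_array (some a) (some b)

def pvChain (split_array : List String) (l : List Int) : List (List String) :=
  (l.zip l.tail).map (fun se => pvSlice split_array se.1 se.2)

def pvStarts (ref_array : List String) (m : Nat) : List Int :=
  0 :: (PySem.List.pyRange 1 (m : Int) 1).filter (fun i => PySem.List.pyGetD ref_array i "" != "nan")

theorem pv_getLastD_mem : ∀ (r : List Int) (a d : Int), (a :: r).getLastD d ∈ a :: r := by
  intro r
  induction r with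
  | nil => intro a d; simp
  | cons b r ih =>
    intro a d
    rw [List.getLastD_cons]
    exact List.mem_cons_of_mem a (ih b a)

theorem pv_zip_tail_snoc (l : List Int) (t : Int) (h : l ≠ []) :
    l.zip (l.tail ++ [t]) = l.zip l.tail ++ [(l.getLastD 0, t)] := by
  induction l with
  | nil => simp at h
  | cons a r ih =>
    cases r with
    | nil => simp
    | cons b r' => simpa using ih (by simp)

theorem pv_zip_tail_append (l : List Int) (t : Int) (h : l ≠ []) :
    (l ++ [t]).zip (l.tail ++ [t]) = l.zip l.tail ++ [(l.getLastD 0, t)] := by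
  induction l with
  | nil => simp at h
  | cons a r ih =>
    cases r with
    | nil => simp
    | cons b r' => simpa using ih (by simp)

theorem pv_chain_append (split_array : List String) (l : List Int) (t : Int) (h : l ≠ []) :
    pvChain split_array (l ++ [t]) =
      pvChain split_array l ++ [pvSlice split_array (l.getLastD 0) t] := by
  unfold pvChain
  rw [List.tail_append_of_ne_nil h, pv_zip_tail_append l t h]
  simp

theorem pv_slice_extend (split_array : List String) (s : Int) (m : Nat)
    (h0 : 0 ≤ s) (h1 : s ≤ (m : Int)) (h2 : m < split_array.length) :
    pvSlice split_array s ((m : Int) + 1) =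
      pvSlice split_array s (m : Int) ++ [split_array.getD m ""] := by
  unfold pvSlice
  rw [PySem.List.slice_toNat _ h0 (by omega), PySem.List.slice_toNat _ h0 (by omega)]
  have hs : s.toNat ≤ m := by omega
  have htn : ((m : Int) + 1).toNat = m + 1 := by omega
  have htm : ((m : Int)).toNat = m := by omega
  rw [htn, htm]
  have h3 : m + 1 - s.toNat = (m - s.toNat) + 1 := by omega
  rw [h3, List.take_add_one, List.getElem?_drop]
  have h4 : s.toNat + (m - s.toNat) = m := by omega
  rw [h4, List.getElem?_eq_getElem h2]
  simp [List.getD, List.getElem?_eq_getElem h2]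

theorem pv_slice_nil (split_array : List String) (m : Nat) :
    pvSlice split_array (m : Int) (m : Int) = [] := by
  unfold pvSlice
  rw [PySem.List.slice_toNat _ (by omega) (by omega), Nat.sub_self, List.take_zero]

theorem pv_starts_mem (ref_array : List String) (m : Nat) (x : Int)
    (hx : x ∈ pvStarts ref_array m) : 0 ≤ x ∧ x < max (m : Int) 1 := by
  unfold pvStarts at hx
  rcases List.mem_cons.1 hx with h | h
  · omega
  · have := (PySem.List.mem_pyRange_one).1 (List.mem_of_mem_filter h)
    omega

theorem pv_invA (ref_array : List String) (split_array : List String) :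
    ∀ (m : Nat), 1 ≤ m → m ≤ split_array.length →
      (PySem.List.pyRange 0 (m : Int) 1).foldl (pvStepA ref_array split_array) ([], []) =
        (pvChain split_array (pvStarts ref_array m),
         pvSlice split_array ((pvStarts ref_array m).getLastD 0) (m : Int)) := by
  intro m
  induction m with
  | zero => intro h; omega
  | succ m ih =>
    intro _ hle
    by_cases hm0 : m = 0
    · -- base: m + 1 = 1, the loop runs once with i = 0
      subst hm0
      have h1 : 0 < split_array.length := by omega
      have hr : PySem.List.pyRange 0 ((0 + 1 : Nat) : Int) 1 = [(0 : Int)] := by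
        norm_num [PySem.List.pyRange_one]
      have hstarts : pvStarts ref_array (0 + 1) = [(0 : Int)] := by
        unfold pvStarts
        norm_num [PySem.List.pyRange_one]
      have e1 := pv_slice_extend split_array 0 0 le_rfl (by norm_num) h1
      have e0 := pv_slice_nil split_array 0
      norm_num at e1 e0
      rw [e0] at e1
      norm_num at e1
      have hg0 : PySem.List.pyGetD split_array (0 : Int) "" = split_array.getD 0 "" := by
        simpa using PySem.List.pyGetD_natCast split_array 0 ""
      rw [hr]
      simp only [List.foldl_cons, List.foldl_nil]
      unfold pvStepA
      rw [hstarts]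
      simp [pvChain, hg0, e1]
    · have hm1 : 1 ≤ m := by omega
      have hlen : m < split_array.length := by omega
      have hc : ((m + 1 : Nat) : Int) = (m : Int) + 1 := by push_cast; ring
      rw [hc, PySem.List.pyRange_one_succ_right (by omega : (0 : Int) ≤ (m : Int)),
          List.foldl_append, ih hm1 (by omega)]
      simp only [List.foldl_cons, List.foldl_nil]
      have hne : (((m : Int)) == 0) = false := by simp; omega
      have hgm : PySem.List.pyGetD split_array ((m : Int)) "" = split_array.getD m "" :=
        PySem.List.pyGetD_natCast split_array m ""
      have hstarts : pvStarts ref_array (m + 1) =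
          pvStarts ref_array m ++
            (if PySem.List.pyGetD ref_array ((m : Int)) "" != "nan" then [(m : Int)] else []) := by
        unfold pvStarts
        rw [hc, PySem.List.pyRange_one_succ_right (by omega : (1 : Int) ≤ (m : Int)),
            List.filter_append]
        simp only [List.filter]
        split <;> simp_all
      have hlast : 0 ≤ (pvStarts ref_array m).getLastD 0 ∧
          (pvStarts ref_array m).getLastD 0 ≤ (m : Int) := by
        have hmem : (pvStarts ref_array m).getLastD 0 ∈ pvStarts ref_array m := by
          unfold pvStarts; exact pv_getLastD_mem _ 0 0
        have := pv_starts_mem ref_array m _ hmem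
        omega
      unfold pvStepA
      rw [hne]
      simp only [Bool.false_eq_true, if_false]
      by_cases hnan : (PySem.List.pyGetD ref_array ((m : Int)) "" == "nan") = true
      · -- continue the current run: boundary table unchanged, last slice extends
        have hcond : ((PySem.List.pyGetD ref_array ((m : Int)) "" == "nan" &&
              PySem.List.pyGetD ref_array ((m : Int) - 1) "" == "nan")
            || (PySem.List.pyGetD ref_array ((m : Int)) "" == "nan" &&
              PySem.List.pyGetD ref_array ((m : Int) - 1) "" != "nan")) = true := by
          rw [hnan]
          simp [bne]
        rw [hcond, if_pos rfl]
        have hfilt : (PySem.List.pyGetD ref_array ((m : Int)) "" != "nan") = false := by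
          simp only [bne, hnan, Bool.not_true]
        rw [hfilt] at hstarts
        simp only [Bool.false_eq_true, if_false, List.append_nil] at hstarts
        rw [hstarts]
        rw [pv_slice_extend split_array _ m hlast.1 hlast.2 hlen, hgm]
      · -- a new group starts at index m
        have hnan' : (PySem.List.pyGetD ref_array ((m : Int)) "" == "nan") = false :=
          Bool.not_eq_true _ ▸ (by simpa using hnan)
        have hcond : ((PySem.List.pyGetD ref_array ((m : Int)) "" == "nan" &&
              PySem.List.pyGetD ref_array ((m : Int) - 1) "" == "nan")
            || (PySem.List.pyGetD ref_array ((m : Int)) "" == "nan" &&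
              PySem.List.pyGetD ref_array ((m : Int) - 1) "" != "nan")) = false := by
          rw [hnan']
          simp
        rw [hcond]
        simp only [Bool.false_eq_true, if_false]
        have hfilt : (PySem.List.pyGetD ref_array ((m : Int)) "" != "nan") = true := by
          simp only [bne, hnan', Bool.not_false]
        rw [hfilt] at hstarts
        simp only [if_true] at hstarts
        rw [hstarts]
        have hnil : pvStarts ref_array m ≠ [] := by unfold pvStarts; simp
        rw [pv_chain_append split_array _ _ hnil, List.getLastD_concat]
        have hsingle : pvSlice split_array ((m : Int)) ((m : Int) + 1) = [split_array.getD m ""] := by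
          rw [pv_slice_extend split_array _ m (by omega) le_rfl hlen, pv_slice_nil]
          simp
        rw [hsingle, hgm]

theorem pv_alt_eq (ref_array : List String) (split_array : List String) :
    field_array_of_arrays_alt ref_array split_array =
      pvChain split_array (pvStarts ref_array split_array.length) ++
        [pvSlice split_array ((pvStarts ref_array split_array.length).getLastD 0)
          (split_array.length : Int)] := by
  have hnil : pvStarts ref_array split_array.length ≠ [] := by unfold pvStarts; simp
  show (List.map (fun se => PySem.List.slice split_array (some se.1) (some se.2))
      ((pvStarts ref_array split_array.length).zip
        (PySem.List.slice (pvStarts ref_array split_array.length) (some 1) none ++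
          [(split_array.length : Int)]))) = _
  rw [PySem.List.slice_from_one, pv_zip_tail_snoc _ _ hnil, List.map_append]
  rfl

-- ===== VERDICT (by name: the statement is the Claim_ definition above) =====
theorem field_array_of_arrays_spec : Claim_equal_field_array_of_arrays := by
  intro ref_array split_array _ _
  unfold Spec_field_array_of_arrays
  rw [pv_alt_eq]
  by_cases h : split_array.length = 0
  · -- empty split_array: both sides are [[]]
    unfold field_array_of_arrays pvChain pvStarts pvSlice
    rw [h]
    norm_num
    rw [PySem.List.slice_to split_array (le_refl (0 : Int))]
    simp
  · have h1 : 1 ≤ split_array.length := by omega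
    unfold field_array_of_arrays
    rw [pv_invA ref_array split_array split_array.length h1 le_rfl]
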